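-- pv_equiv track=rewrite | github.com/krisvladimirov/Jigsaw_Solver | CNN component/jigsaw_project/Code/Kristiyan/Jigsaw_Solver/Chunk.py | adjust_piece_coordinates
-- ===== SOURCE A (Python) =====
-- from operator import add
--
-- def adjust_piece_coordinates(dictionary, off_set):
--     """
--         Adjust the piece_coordinates to accommodate the union of two chunks
--     :param dictionary:
--     :type dictionary:
--     :param off_set:
--     :type off_set:
--     :return:
--     :rtype: tuple
--     """
--     height = 1
--     width = 1
--     for key, value in dictionary.items():
--         old_value = dictionary[key]
--         new_value = tuple(map(add, old_value, off_set))
--         if new_value[0] + 1 > height: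
--             height = new_value[0] + 1
--         if new_value[1] + 1 > width:
--             width = new_value[1] + 1
--         dictionary[key] = new_value
--     # TODO - While calculating the new pieces we look at how height changes and if it exceeds the value of the chunk
--     # that it is going to be merged into
--     return dictionary, height, width
-- ===== SOURCE B (Python) =====
-- def adjust_piece_coordinates(dictionary, off_set):
--     """Compute the maxima of the ORIGINAL coordinates first and add the
--     offset to each maximum once (max commutes with translation), instead of
--     tracking maxima of shifted values inside the update loop; then shift all
--     values in the same dict object."""
--     dx, dy = off_set
--     if dictionary:
--         mx = max(v[0] for v in dictionary.values())
--         my = max(v[1] for v in dictionary.values())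
--         height = max(1, mx + dx + 1)
--         width = max(1, my + dy + 1)
--     else:
--         height, width = 1, 1
--     for key, (x, y) in dictionary.items():
--         dictionary[key] = (x + dx, y + dy)
--     return dictionary, height, width
-- ===== Notes on version B (the rewrite author's own statement) =====
-- stated objective: alternative
-- what changed: B derives height/width from the maxima of the original (unshifted) coordinates computed before the mutation loop, adding the offset once per axis (max commutes with translation) and flooring at 1 explicitly, instead of A's conditional max-tracking of each shifted value inside the loop.
import Mathlib
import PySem

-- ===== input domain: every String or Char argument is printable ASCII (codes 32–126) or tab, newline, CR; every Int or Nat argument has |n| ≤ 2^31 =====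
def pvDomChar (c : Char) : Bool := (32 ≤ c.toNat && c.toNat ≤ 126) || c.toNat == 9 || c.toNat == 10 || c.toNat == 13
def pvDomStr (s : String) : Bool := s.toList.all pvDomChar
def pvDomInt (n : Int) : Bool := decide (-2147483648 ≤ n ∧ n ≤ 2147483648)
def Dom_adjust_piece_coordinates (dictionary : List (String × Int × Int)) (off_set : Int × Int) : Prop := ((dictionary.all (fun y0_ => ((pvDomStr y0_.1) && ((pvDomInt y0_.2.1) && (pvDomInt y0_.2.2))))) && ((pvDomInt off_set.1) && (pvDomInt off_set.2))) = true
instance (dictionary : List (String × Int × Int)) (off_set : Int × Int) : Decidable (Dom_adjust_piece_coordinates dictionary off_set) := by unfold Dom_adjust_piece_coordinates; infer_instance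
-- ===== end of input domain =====

-- B derives height/width from the maxima of the ORIGINAL coordinates, computed before
-- the shift, adding the offset once per axis (max commutes with translation), instead
-- of A's conditional max-tracking of each shifted value inside the loop (objective:
-- alternative; same cost). Both mutate the argument dict in Python; the equivalence
-- proved here is about the return value.

-- ===== PORT A =====
-- dictionary[key] lookup: first matching key (dict keys are unique under Pre_)
def pyDictGetD (d : List (String × Int × Int)) (k : String) (dflt : Int × Int) : Int × Int :=
  match d.find? (fun kv => kv.1 == k) with
  | some kv => kv.2
  | none => dflt

-- dictionary[key] = v : overwrite the value at the first occurrence of key (in place)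
def pyDictSet (d : List (String × Int × Int)) (k : String) (v : Int × Int) : List (String × Int × Int) :=
  match d with
  | [] => []
  | kv :: rest => if kv.1 == k then (k, v) :: rest else kv :: pyDictSet rest k v

-- the body of A's for-loop, one iteration over state (dictionary, height, width)
def stepA (off_set : Int × Int) (st : (List (String × Int × Int)) × Int × Int)
    (kv : String × Int × Int) : (List (String × Int × Int)) × Int × Int :=
  let old_value := pyDictGetD st.1 kv.1 kv.2   -- dictionary[key]; the key is always present, the default is never used
  let new_value : Int × Int := (old_value.1 + off_set.1, old_value.2 + off_set.2)
  let height := if new_value.1 + 1 > st.2.1 then new_value.1 + 1 else st.2.1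
  let width := if new_value.2 + 1 > st.2.2 then new_value.2 + 1 else st.2.2
  (pyDictSet st.1 kv.1 new_value, height, width)

def adjust_piece_coordinates (dictionary : List (String × Int × Int)) (off_set : Int × Int) : (List (String × Int × Int)) × Int × Int :=
  -- for key, value in dictionary.items(): … (value itself is unused by A's body)
  dictionary.foldl (stepA off_set) (dictionary, 1, 1)

-- ===== PORT B =====
def adjust_piece_coordinates_alt (dictionary : List (String × Int × Int)) (off_set : Int × Int) : (List (String × Int × Int)) × Int × Int :=
  let dx := off_set.1
  let dy := off_set.2
  -- the shift loop: dictionary[key] = (x + dx, y + dy) for every key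
  let shifted := dictionary.map (fun kv => (kv.1, kv.2.1 + dx, kv.2.2 + dy))
  match dictionary with
  | [] => (shifted, 1, 1)
  | kv :: rest =>
      -- max over a nonempty iterable: fold max over the tail, seeded with the head
      let mx := (rest.map (fun p => p.2.1)).foldl max kv.2.1
      let my := (rest.map (fun p => p.2.2)).foldl max kv.2.2
      (shifted, max 1 (mx + dx + 1), max 1 (my + dy + 1))

-- ===== PRECONDITION & SPEC =====
-- Pre_ excludes association lists with duplicate keys: they cannot arise from a Python
-- dict, whose keys are unique, so A's behaviour there is a representation artefact.
def Pre_adjust_piece_coordinates (dictionary : List (String × Int × Int)) (off_set : Int × Int) : Prop :=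
  (dictionary.map Prod.fst).Nodup

instance (dictionary : List (String × Int × Int)) (off_set : Int × Int) : Decidable (Pre_adjust_piece_coordinates dictionary off_set) := by unfold Pre_adjust_piece_coordinates; infer_instance

def pvWitness_adjust_piece_coordinates : (List (String × Int × Int)) × (Int × Int) :=
  ([("a", (0, 0)), ("b", (2, 3))], (1, 1))

def Spec_adjust_piece_coordinates (dictionary : List (String × Int × Int)) (off_set : Int × Int) (out : (List (String × Int × Int)) × Int × Int) : Prop := out = adjust_piece_coordinates_alt dictionary off_set
instance (dictionary : List (String × Int × Int)) (off_set : Int × Int) (out : (List (String × Int × Int)) × Int × Int) : Decidable (Spec_adjust_piece_coordinates dictionary off_set out) := by unfold Spec_adjust_piece_coordinates; infer_instance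

-- ===== CLAIM (what is proved, stated in full; the proofs are below) =====
def Claim_equal_adjust_piece_coordinates : Prop := ∀ (dictionary : List (String × Int × Int)) (off_set : Int × Int), Dom_adjust_piece_coordinates dictionary off_set → Pre_adjust_piece_coordinates dictionary off_set → Spec_adjust_piece_coordinates dictionary off_set (adjust_piece_coordinates dictionary off_set)

-- ===== LEMMAS AND PROOFS =====

theorem pyDictGetD_append_hit (pre : List (String × Int × Int)) (k : String)
    (v : Int × Int) (ys : List (String × Int × Int)) (dflt : Int × Int)
    (h : ∀ p ∈ pre, p.1 ≠ k) :
    pyDictGetD (pre ++ (k, v) :: ys) k dflt = v := by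
  induction pre with
  | nil => simp [pyDictGetD]
  | cons q rest ih =>
      have hq : q.1 ≠ k := h q (by simp)
      have hrest : ∀ p ∈ rest, p.1 ≠ k := fun p hp => h p (by simp [hp])
      simpa [pyDictGetD, List.find?, hq] using ih hrest

theorem pyDictSet_append_hit (pre : List (String × Int × Int)) (k : String)
    (v w : Int × Int) (ys : List (String × Int × Int))
    (h : ∀ p ∈ pre, p.1 ≠ k) :
    pyDictSet (pre ++ (k, v) :: ys) k w = pre ++ (k, w) :: ys := by
  induction pre with
  | nil => simp [pyDictSet]
  | cons q rest ih =>
      have hq : q.1 ≠ k := h q (by simp)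
      have hrest : ∀ p ∈ rest, p.1 ≠ k := fun p hp => h p (by simp [hp])
      simp [pyDictSet, hq, ih hrest]

theorem if_gt_eq_max (h x : Int) : (if x > h then x else h) = max h x := by
  split <;> omega

-- loop invariant for A: folding over the remaining suffix, with the prefix already shifted
theorem loop_invariant (off_set : Int × Int) :
    ∀ (suf pre : List (String × Int × Int)) (h w : Int),
    (((pre ++ suf).map Prod.fst).Nodup) →
    suf.foldl (stepA off_set)
      (pre.map (fun kv => (kv.1, kv.2.1 + off_set.1, kv.2.2 + off_set.2)) ++ suf, h, w)
    = ((pre ++ suf).map (fun kv => (kv.1, kv.2.1 + off_set.1, kv.2.2 + off_set.2)),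
       (suf.map (fun kv => kv.2.1 + off_set.1 + 1)).foldl max h,
       (suf.map (fun kv => kv.2.2 + off_set.2 + 1)).foldl max w) := by
  intro suf
  induction suf with
  | nil => intro pre h w _; simp
  | cons kv rest ih =>
      intro pre h w hnd
      have hpre : ∀ p ∈ pre.map (fun kv => (kv.1, kv.2.1 + off_set.1, kv.2.2 + off_set.2)),
          p.1 ≠ kv.1 := by
        intro p hp
        rcases List.mem_map.mp hp with ⟨q, hq, rfl⟩
        have : kv.1 ∉ pre.map Prod.fst := by
          have := hnd
          simp only [List.map_append, List.nodup_append] at this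
          exact fun hk => this.2.2 kv.1 hk kv.1 (by simp) rfl
        intro he
        exact this (List.mem_map.mpr ⟨q, hq, he⟩)
      simp only [List.foldl_cons]
      have hs : stepA off_set
          (pre.map (fun kv => (kv.1, kv.2.1 + off_set.1, kv.2.2 + off_set.2)) ++ kv :: rest, h, w) kv
          = ((pre ++ [kv]).map (fun kv => (kv.1, kv.2.1 + off_set.1, kv.2.2 + off_set.2)) ++ rest,
             max h (kv.2.1 + off_set.1 + 1), max w (kv.2.2 + off_set.2 + 1)) := by
        simp only [stepA]
        rw [pyDictGetD_append_hit _ _ _ _ _ hpre, pyDictSet_append_hit _ _ _ _ _ hpre]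
        simp only [if_gt_eq_max, List.map_append, List.map_cons, List.map_nil,
          List.append_assoc, List.cons_append, List.nil_append]
      have hnd' : (((pre ++ [kv]) ++ rest).map Prod.fst).Nodup := by
        simpa [List.append_assoc] using hnd
      rw [hs, ih (pre ++ [kv]) _ _ hnd']
      simp [List.append_assoc]

-- pull a seed into the fold: foldl max (max a b) l = max a (foldl max b l)
theorem foldl_max_seed (l : List Int) : ∀ (a b : Int),
    l.foldl max (max a b) = max a (l.foldl max b) := by
  induction l with
  | nil => intro a b; rfl
  | cons x xs ih =>
      intro a b
      simp only [List.foldl_cons, max_assoc]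
      exact ih a (max b x)

-- max commutes with translation: folding max over elements shifted by c
theorem foldl_max_shift (l : List Int) : ∀ (a c : Int),
    (l.map (fun x => x + c)).foldl max (a + c) = l.foldl max a + c := by
  induction l with
  | nil => intro a c; rfl
  | cons x xs ih =>
      intro a c
      have : max (a + c) (x + c) = max a x + c := by omega
      simp only [List.map_cons, List.foldl_cons, this, ih]

-- A's fold-of-max over shifted values equals B's max of originals plus offset
theorem max_pass_int (l : List Int) (a c : Int) :
    (l.map (fun x => x + c + 1)).foldl max (max 1 (a + c + 1))
    = max 1 (l.foldl max a + c + 1) := by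
  have hm : l.map (fun x => x + c + 1) = l.map (fun x => x + (c + 1)) := by
    simp [add_assoc]
  rw [hm, show max 1 (a + c + 1) = max 1 (a + (c + 1)) by rw [add_assoc],
    foldl_max_seed, foldl_max_shift, ← add_assoc]

-- the same, read off a list of pairs through a projection f
theorem max_pass_eq {A : Type} (f : A → Int) (kv : A) (rest : List A) (c : Int) :
    (rest.map (fun p => f p + c + 1)).foldl max (max 1 (f kv + c + 1))
    = max 1 ((rest.map f).foldl max (f kv) + c + 1) := by
  have h := max_pass_int (rest.map f) (f kv) c
  simpa [List.map_map, Function.comp_def] using h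

-- ===== VERDICT (by name: the statement is the Claim_ definition above) =====
theorem adjust_piece_coordinates_spec : Claim_equal_adjust_piece_coordinates := by
  intro dictionary off_set _ hpre
  show adjust_piece_coordinates dictionary off_set = adjust_piece_coordinates_alt dictionary off_set
  unfold adjust_piece_coordinates adjust_piece_coordinates_alt
  have hinv := loop_invariant off_set dictionary [] 1 1 (by simpa using hpre)
  simp only [List.map_nil, List.nil_append] at hinv
  rw [hinv]
  cases dictionary with
  | nil => simp
  | cons kv rest =>
      refine Prod.ext rfl (Prod.ext ?_ ?_)
      · exact max_pass_eq (fun p => p.2.1) kv rest off_set.1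
      · exact max_pass_eq (fun p => p.2.2) kv rest off_set.2
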